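-- pv_equiv track=rewrite | github.com/gschottlender/ReverseLigQ | Upload_new_organisms/3_obtain_chembl_ligands.py | filter_organism_domains_and_targets
-- ===== SOURCE A (Python) =====
-- from collections import defaultdict
--
-- def filter_organism_domains_and_targets(domain_targets_chembl_db,fams_prots_db):
-- 	fams_targets = defaultdict(list)
-- 	for target in domain_targets_chembl_db:
-- 		for fam in domain_targets_chembl_db[target]:
-- 		    if fam in fams_prots_db and len(domain_targets_chembl_db[target]) == 1:
-- 		        fams_targets[domain_targets_chembl_db[target][0]].append(target)
-- 		    elif (fam in fams_prots_db and len(domain_targets_chembl_db[target]) >1) and (target not in fams_targets['('+', '.join(domain_targets_chembl_db[target])+')']):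
-- 		        fams_targets['('+', '.join(domain_targets_chembl_db[target])+')'].append(target)
-- 	return dict(fams_targets)
-- ===== SOURCE B (Python) =====
-- def filter_organism_domains_and_targets(domain_targets_chembl_db, fams_prots_db):
--     # Staged group-by: build a flat (key, target) list, dedup the keys in
--     # first-occurrence order, then build each bucket by scanning the pair list.
--     pairs = []
--     for target, fams in domain_targets_chembl_db.items():
--         if len(fams) == 1 and fams[0] in fams_prots_db:
--             pairs.append((fams[0], target))
--         elif len(fams) > 1 and any(f in fams_prots_db for f in fams):
--             pairs.append(('(' + ', '.join(fams) + ')', target))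
--     keys = []
--     for k, _ in pairs:
--         if k not in keys:
--             keys.append(k)
--     return {k: [t for k2, t in pairs if k2 == k] for k in keys}
-- ===== Notes on version B (the rewrite author's own statement) =====
-- stated objective: alternative
-- what changed: B replaces A's nested loop that mutates a defaultdict (re-deriving the key and re-checking target membership per family) with a staged group-by: one pass emits a flat (key, target) pair list with a single decision per target, a second pass dedups keys in first-occurrence order, and each bucket is built by filtering the pair list.
import Mathlib
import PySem

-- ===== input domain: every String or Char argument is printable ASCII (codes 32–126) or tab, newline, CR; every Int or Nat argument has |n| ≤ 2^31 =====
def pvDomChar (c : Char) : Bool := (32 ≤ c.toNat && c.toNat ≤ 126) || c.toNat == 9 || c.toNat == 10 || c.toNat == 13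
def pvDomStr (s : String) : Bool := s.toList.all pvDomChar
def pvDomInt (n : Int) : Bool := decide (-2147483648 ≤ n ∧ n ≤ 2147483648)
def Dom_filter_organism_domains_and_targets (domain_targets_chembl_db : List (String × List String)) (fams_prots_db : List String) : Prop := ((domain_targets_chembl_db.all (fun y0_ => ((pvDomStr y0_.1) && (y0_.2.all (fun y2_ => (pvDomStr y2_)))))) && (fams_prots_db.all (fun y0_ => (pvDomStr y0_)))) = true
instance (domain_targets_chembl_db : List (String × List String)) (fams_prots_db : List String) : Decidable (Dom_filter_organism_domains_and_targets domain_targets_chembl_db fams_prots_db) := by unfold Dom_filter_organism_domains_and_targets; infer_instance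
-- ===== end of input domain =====

-- B replaces A's nested defaultdict-mutating loops by a staged group-by over a flat (key, target) pair list (objective: alternative).

-- ===== PORT A =====
-- key string '(' + ', '.join(fams) + ')' (both Pythons build it with the same expression)
def pvKey (fams : List String) : String := "(" ++ PySem.Str.join ", " fams ++ ")"

-- A's inner loop body: for fam in fams: if/elif over the defaultdict (access-creates-key is only
-- observable when it is immediately followed by the append, so modify key [] (· ++ [target]) is exact)
def pvStepA (fams_prots_db : List String) (fams : List String) (target : String)
    (d : PySem.Dict String (List String)) (fam : String) : PySem.Dict String (List String) :=
  if fams_prots_db.contains fam && (fams.length == 1) then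
    d.modify (PySem.List.pyGetD fams 0 "") [] (· ++ [target])
  else if (fams_prots_db.contains fam && decide (1 < fams.length))
          && !((d.getD (pvKey fams) []).contains target) then
    d.modify (pvKey fams) [] (· ++ [target])
  else d

def filter_organism_domains_and_targets (domain_targets_chembl_db : List (String × List String)) (fams_prots_db : List String) : List (String × List String) :=
  (domain_targets_chembl_db.foldl
    (fun d p => p.2.foldl (pvStepA fams_prots_db p.2 p.1) d)
    PySem.Dict.empty).items

-- ===== PORT B =====
-- B's single per-target decision: the key this target contributes a pair under, if any
def pvKeyOf (fams_prots_db : List String) (p : String × List String) : Option String :=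
  if (p.2.length == 1) && fams_prots_db.contains (PySem.List.pyGetD p.2 0 "") then
    some (PySem.List.pyGetD p.2 0 "")
  else if decide (1 < p.2.length) && p.2.any (fun f => fams_prots_db.contains f) then
    some (pvKey p.2)
  else none

-- stage 1: the flat (key, target) pair list, built by appending
def pvPairs (fams_prots_db : List String) (domain_targets_chembl_db : List (String × List String)) : List (String × String) :=
  domain_targets_chembl_db.foldl
    (fun acc p => match pvKeyOf fams_prots_db p with
      | some k => acc ++ [(k, p.1)]
      | none => acc) []

def filter_organism_domains_and_targets_alt (domain_targets_chembl_db : List (String × List String)) (fams_prots_db : List String) : List (String × List String) :=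
  let pairs := pvPairs fams_prots_db domain_targets_chembl_db
  -- stage 2: keys in first-occurrence order ('if k not in keys: keys.append(k)' = Set.add)
  let keys := (pairs.map (·.1)).foldl PySem.Set.add []
  -- stage 3: one bucket per key, by scanning the pair list
  keys.map (fun k => (k, (pairs.filter (fun q => q.1 == k)).map (·.2)))

-- ===== PRECONDITION & SPEC =====
-- Pre_ excludes association lists with a duplicated key: they do not represent a Python dict
-- (the Python parameter is a dict, whose keys are unique), so no Python behaviour is claimed there.
def Pre_filter_organism_domains_and_targets (domain_targets_chembl_db : List (String × List String)) (fams_prots_db : List String) : Prop :=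
  (domain_targets_chembl_db.map Prod.fst).Nodup

instance (domain_targets_chembl_db : List (String × List String)) (fams_prots_db : List String) : Decidable (Pre_filter_organism_domains_and_targets domain_targets_chembl_db fams_prots_db) := by unfold Pre_filter_organism_domains_and_targets; infer_instance

def pvWitness_filter_organism_domains_and_targets : (List (String × List String)) × List String :=
  ([("t1", ["a"]), ("t2", ["a", "b"]), ("t3", ["c"])], ["a", "b"])

def Spec_filter_organism_domains_and_targets (domain_targets_chembl_db : List (String × List String)) (fams_prots_db : List String) (out : List (String × List String)) : Prop := out = filter_organism_domains_and_targets_alt domain_targets_chembl_db fams_prots_db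
instance (domain_targets_chembl_db : List (String × List String)) (fams_prots_db : List String) (out : List (String × List String)) : Decidable (Spec_filter_organism_domains_and_targets domain_targets_chembl_db fams_prots_db out) := by unfold Spec_filter_organism_domains_and_targets; infer_instance

-- ===== CLAIM (what is proved, stated in full; the proofs are below) =====
def Claim_equal_filter_organism_domains_and_targets : Prop := ∀ (domain_targets_chembl_db : List (String × List String)) (fams_prots_db : List String), Dom_filter_organism_domains_and_targets domain_targets_chembl_db fams_prots_db → Pre_filter_organism_domains_and_targets domain_targets_chembl_db fams_prots_db → Spec_filter_organism_domains_and_targets domain_targets_chembl_db fams_prots_db (filter_organism_domains_and_targets domain_targets_chembl_db fams_prots_db)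

-- ===== LEMMAS AND PROOFS =====

-- once the target is in the bucket of pvKey fams, the rest of A's inner loop is a no-op
lemma pvInner_absorb (fp fams : List String) (t : String) (l : List String)
    (d : PySem.Dict String (List String))
    (hlen : 1 < fams.length) (ht : t ∈ d.getD (pvKey fams) []) :
    l.foldl (pvStepA fp fams t) d = d := by
  induction l with
  | nil => rfl
  | cons f l ih =>
    have h1 : (fams.length == 1) = false := by simp; omega
    simp [List.foldl, pvStepA, h1, ht, ih]

-- A's inner loop on a ≥2-family list: it appends the target exactly once iff some family matches
lemma pvInner_multi (fp fams : List String) (t : String) (l : List String)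
    (d : PySem.Dict String (List String))
    (hlen : 1 < fams.length) (ht : t ∉ d.getD (pvKey fams) []) :
    l.foldl (pvStepA fp fams t) d =
      if l.any (fun f => fp.contains f) then d.modify (pvKey fams) [] (· ++ [t]) else d := by
  induction l with
  | nil => simp
  | cons f l ih =>
    have h1 : (fams.length == 1) = false := by simp; omega
    by_cases hf : f ∈ fp
    · have habs : l.foldl (pvStepA fp fams t) (d.modify (pvKey fams) [] (· ++ [t])) =
          d.modify (pvKey fams) [] (· ++ [t]) := by
        apply pvInner_absorb fp fams t l _ hlen
        rw [PySem.Dict.getD_modify_self]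
        simp
      simp [List.foldl, pvStepA, h1, hf, hlen, ht, habs]
    · simp [List.foldl, pvStepA, h1, hf, ih]

-- A's whole per-target processing is one modify under pvKeyOf, provided the target is in no bucket yet
lemma pvStep_eq (fp : List String) (p : String × List String)
    (d : PySem.Dict String (List String))
    (ht : ∀ k, p.1 ∉ d.getD k []) :
    p.2.foldl (pvStepA fp p.2 p.1) d =
      match pvKeyOf fp p with
      | some k => d.modify k [] (· ++ [p.1])
      | none => d := by
  obtain ⟨t, fams⟩ := p
  match fams with
  | [] => simp [pvKeyOf]
  | [f] =>
    by_cases hf : f ∈ fp <;>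
      simp [List.foldl, pvStepA, pvKeyOf, hf, PySem.List.pyGetD_zero_cons]
  | f :: g :: l =>
    rw [pvInner_multi fp (f :: g :: l) t (f :: g :: l) d (by simp) (ht _)]
    simp only [pvKeyOf]
    cases hc : (f :: g :: l).any (fun f => fp.contains f) <;> simp_all

-- a modify-append step only adds the processed target itself to buckets
lemma pvMem_getD_modify (k' t s k : String) (d : PySem.Dict String (List String))
    (h : s ∈ (d.modify k' [] (· ++ [t])).getD k []) : s ∈ d.getD k [] ∨ s = t := by
  rw [PySem.Dict.getD_modify] at h
  split_ifs at h with hk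
  · rcases List.mem_append.1 h with h | h
    · exact Or.inl (hk ▸ h)
    · simp at h; exact Or.inr h
  · exact Or.inl h

-- A's fold equals the modify-fold over the pair list, as long as the pending targets
-- are distinct and not yet in any bucket
lemma pvFoldA_eq (fp : List String) (db : List (String × List String))
    (d : PySem.Dict String (List String))
    (hnd : (db.map Prod.fst).Nodup)
    (H : ∀ p ∈ db, ∀ k, p.1 ∉ d.getD k []) :
    db.foldl (fun d p => p.2.foldl (pvStepA fp p.2 p.1) d) d =
      (db.filterMap (fun p => (pvKeyOf fp p).map (fun k => (k, p.1)))).foldl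
        (fun d q => d.modify q.1 [] (· ++ [q.2])) d := by
  induction db generalizing d with
  | nil => rfl
  | cons p db ih =>
    rw [List.map_cons, List.nodup_cons] at hnd
    simp only [List.foldl, List.filterMap_cons]
    rw [pvStep_eq fp p d (H p (List.mem_cons_self ..))]
    cases hko : pvKeyOf fp p with
    | none =>
      simp only
      exact ih d hnd.2 (fun q hq k => H q (List.mem_cons_of_mem _ hq) k)
    | some k =>
      simp only [Option.map_some, List.foldl]
      apply ih _ hnd.2
      intro q hq k' hqk
      rcases pvMem_getD_modify k p.1 q.1 k' _ hqk with h | h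
      · exact H q (List.mem_cons_of_mem _ hq) k' h
      · exact hnd.1 (h ▸ List.mem_map_of_mem hq)

-- B's appending loop builds exactly that filterMap
lemma pvPairs_eq (fp : List String) (db : List (String × List String)) :
    pvPairs fp db = db.filterMap (fun p => (pvKeyOf fp p).map (fun k => (k, p.1))) := by
  unfold pvPairs
  suffices h : ∀ acc : List (String × String),
      db.foldl (fun acc p => match pvKeyOf fp p with
        | some k => acc ++ [(k, p.1)] | none => acc) acc =
      acc ++ db.filterMap (fun p => (pvKeyOf fp p).map (fun k => (k, p.1))) by
    simpa using h []
  induction db with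
  | nil => simp
  | cons p db ih =>
    intro acc
    cases hko : pvKeyOf fp p <;> simp [List.foldl, hko, ih]

-- the modify-fold's items list IS the staged group-by over the pair list
lemma pvGroup_items (l : List (String × String)) :
    (l.foldl (fun d q => d.modify q.1 [] (· ++ [q.2])) (PySem.Dict.empty (κ := String))).items =
      ((l.map (·.1)).foldl PySem.Set.add []).map
        (fun k => (k, (l.filter (fun q => q.1 == k)).map (·.2))) := by
  set d := l.foldl (fun dd q => dd.modify q.1 [] (· ++ [q.2])) (PySem.Dict.empty (κ := String)) with hd
  have hnd : d.keys.Nodup := by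
    rw [hd]
    exact PySem.Dict.nodup_keys_foldl_modify_key l (·.1) [] (fun _ q => (· ++ [q.2])) _
      PySem.Dict.nodup_keys_empty
  have hkeys : d.keys = (l.map (·.1)).foldl PySem.Set.add [] := by
    rw [hd, PySem.Dict.keys_foldl_modify_key]
    rw [← PySem.Set.ofList_eq_foldl]
    simp [PySem.Dict.keys_empty, PySem.Set.update_nil_left]
  have hget : ∀ k, d.getD k [] = (l.filter (fun q => q.1 == k)).map (·.2) := by
    intro k
    rw [hd, PySem.Dict.getD_foldl_modify_append]
    simp [PySem.Dict.getD_empty]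
  rw [PySem.Dict.items_eq_map_keys d hnd [], hkeys]
  exact List.map_congr_left (fun k _ => by rw [hget k])

-- ===== VERDICT (by name: the statement is the Claim_ definition above) =====
theorem filter_organism_domains_and_targets_spec : Claim_equal_filter_organism_domains_and_targets := by
  intro db fp _ hpre
  unfold Spec_filter_organism_domains_and_targets
  unfold filter_organism_domains_and_targets filter_organism_domains_and_targets_alt
  rw [pvFoldA_eq fp db PySem.Dict.empty hpre
    (by intro p _ k; simp [PySem.Dict.getD_empty]), ← pvPairs_eq]
  exact pvGroup_items (pvPairs fp db)
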